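-- pv_equiv track=rewrite | github.com/PengNi/plant_5mC_analysis | stats_nanopore_only_cytosines_profiling/generate_Ccoverperc_in_generegions_from_gff3.py | convert_motif_seq
-- ===== SOURCE A (Python) =====
-- def convert_motif_seq(ori_seq):
--     alphabets = {'A': ['A', ], 'T': ['T', ], 'C': ['C', ], 'G': ['G', ],
--                  'N': ['N', ], 'H': ['A', 'C', 'T']}
--     outbases = []
--     for bbase in ori_seq:
--         outbases.append(alphabets[bbase])
--
--     def recursive_permute(bases_list):
--         if len(bases_list) == 1:
--             return bases_list[0]
--         if len(bases_list) == 2: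
--             pseqs = []
--             for fbase in bases_list[0]:
--                 for sbase in bases_list[1]:
--                     pseqs.append(fbase + sbase)
--             return pseqs
--         else:
--             pseqs = recursive_permute(bases_list[1:])
--             pseq_list = [bases_list[0], pseqs]
--             return recursive_permute(pseq_list)
--     return recursive_permute(outbases)
-- ===== SOURCE B (Python) =====
-- def convert_motif_seq(ori_seq):
--     alphabets = {'A': ['A', ], 'T': ['T', ], 'C': ['C', ], 'G': ['G', ],
--                  'N': ['N', ], 'H': ['A', 'C', 'T']}
--     seqs = ['']
--     for bbase in ori_seq:
--         seqs = [pre + b for pre in seqs for b in alphabets[bbase]]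
--     return seqs
-- ===== Notes on version B (the rewrite author's own statement) =====
-- stated objective: idiomatic
-- what changed: Replaces the bespoke length-cased recursive permute (which re-slices the list and re-enters itself on a two-element wrapper) with a single left-fold that extends the running product by one base position per character.
import Mathlib
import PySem

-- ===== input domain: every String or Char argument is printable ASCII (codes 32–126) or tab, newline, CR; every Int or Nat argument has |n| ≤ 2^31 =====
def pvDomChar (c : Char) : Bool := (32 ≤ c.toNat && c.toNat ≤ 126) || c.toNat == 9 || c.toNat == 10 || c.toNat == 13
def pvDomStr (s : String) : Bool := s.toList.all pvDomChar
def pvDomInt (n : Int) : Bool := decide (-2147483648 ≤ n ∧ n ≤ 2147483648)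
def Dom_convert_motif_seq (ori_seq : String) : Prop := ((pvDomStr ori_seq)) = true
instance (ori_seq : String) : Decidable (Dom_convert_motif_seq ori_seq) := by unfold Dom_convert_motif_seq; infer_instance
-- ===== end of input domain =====

-- B replaces A's bespoke recursive permute with a single left-fold product pass (idiomatic; return-value equivalence).

-- ===== PORT A =====
-- the 'alphabets' dict of both sources as a lookup; the else-branch [] is unreachable under Pre_ (Python: KeyError)
def pvAlphabets (c : Char) : List String :=
  if c = 'A' then ["A"] else if c = 'T' then ["T"] else if c = 'C' then ["C"]
  else if c = 'G' then ["G"] else if c = 'N' then ["N"]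
  else if c = 'H' then ["A", "C", "T"] else []

-- A's inner 'recursive_permute'; the [] case is Python's unbounded recursion (RecursionError), excluded by Pre_
def pvRecPermute : List (List String) → List String
  | [] => []
  | [x] => x
  | [x, y] => x.foldl (fun pseqs fbase => y.foldl (fun pseqs sbase => pseqs ++ [fbase ++ sbase]) pseqs) []
  | x :: y :: z :: rest =>
      let pseqs := pvRecPermute (y :: z :: rest)
      pvRecPermute [x, pseqs]
termination_by bl => bl.length

def convert_motif_seq (ori_seq : String) : List String :=
  pvRecPermute (ori_seq.toList.foldl (fun outbases bbase => outbases ++ [pvAlphabets bbase]) [])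

-- ===== PORT B =====
def convert_motif_seq_alt (ori_seq : String) : List String :=
  ori_seq.toList.foldl (fun seqs bbase => seqs.flatMap (fun pre => (pvAlphabets bbase).map (fun b => pre ++ b))) [""]

-- ===== PRECONDITION & SPEC =====
-- Pre_ excludes the empty motif (A's recursion never terminates: RecursionError) and
-- characters outside the alphabets dict (KeyError in both programs).
def Pre_convert_motif_seq (ori_seq : String) : Prop :=
  ori_seq.toList ≠ [] ∧ (ori_seq.toList.all (fun c => c ∈ (['A', 'T', 'C', 'G', 'N', 'H'] : List Char))) = true
instance (ori_seq : String) : Decidable (Pre_convert_motif_seq ori_seq) := by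
  unfold Pre_convert_motif_seq; infer_instance
def pvWitness_convert_motif_seq : String := "CHG"

def Spec_convert_motif_seq (ori_seq : String) (out : List String) : Prop := out = convert_motif_seq_alt ori_seq
instance (ori_seq : String) (out : List String) : Decidable (Spec_convert_motif_seq ori_seq out) := by unfold Spec_convert_motif_seq; infer_instance

-- ===== CLAIM (what is proved, stated in full; the proofs are below) =====
def Claim_equal_convert_motif_seq : Prop := ∀ (ori_seq : String), Dom_convert_motif_seq ori_seq → Pre_convert_motif_seq ori_seq → Spec_convert_motif_seq ori_seq (convert_motif_seq ori_seq)

-- ===== LEMMAS AND PROOFS =====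

-- B's one fold step, named for the proofs
def pvStep (seqs : List String) (l : List String) : List String :=
  seqs.flatMap (fun pre => l.map (fun b => pre ++ b))

lemma pvStep_nil_start (l : List String) : pvStep [""] l = l := by
  simp [pvStep]

-- A's two-list case is one pvStep
lemma pvRecPermute_pair (x y : List String) :
    pvRecPermute [x, y] = pvStep x y := by
  simp only [pvRecPermute]
  have h : ∀ (acc : List String),
      x.foldl (fun pseqs fbase => y.foldl (fun pseqs sbase => pseqs ++ [fbase ++ sbase]) pseqs) acc
        = acc ++ x.flatMap (fun fbase => y.map (fun sbase => fbase ++ sbase)) := by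
    intro acc
    induction x generalizing acc with
    | nil => simp
    | cons a x ih =>
        rw [List.foldl_cons, PySem.List.foldl_append_singleton_eq_map, ih]
        simp [List.flatMap_cons, List.append_assoc]
  simpa [pvStep] using h []

-- the fold of pvStep factors through its start
lemma pvFoldl_step_factor (ll : List (List String)) (s : List String) :
    ll.foldl pvStep s = s.flatMap (fun pre => (ll.foldl pvStep [""]).map (fun t => pre ++ t)) := by
  induction ll generalizing s with
  | nil => simp
  | cons l ll ih =>
      simp only [List.foldl_cons]
      rw [ih (pvStep s l), ih (pvStep [""] l), pvStep_nil_start]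
      simp [pvStep, List.flatMap_assoc, List.flatMap_map, List.map_flatMap, List.map_map,
        Function.comp_def, String.append_assoc]

lemma pvRecPermute_eq_foldl (ll : List (List String)) (h : ll ≠ []) :
    pvRecPermute ll = ll.foldl pvStep [""] := by
  match ll with
  | [x] => simp [pvRecPermute, pvStep_nil_start]
  | [x, y] => rw [pvRecPermute_pair]; simp [pvStep_nil_start]
  | x :: y :: z :: rest =>
      have ih := pvRecPermute_eq_foldl (y :: z :: rest) (by simp)
      have e : pvRecPermute (x :: y :: z :: rest)
          = pvRecPermute [x, pvRecPermute (y :: z :: rest)] := by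
        simp only [pvRecPermute]
      rw [e, pvRecPermute_pair, ih]
      conv_rhs => rw [List.foldl_cons]
      rw [pvStep_nil_start, pvFoldl_step_factor (y :: z :: rest) x]
      rfl
termination_by ll.length

-- ===== VERDICT (by name: the statement is the Claim_ definition above) =====
theorem convert_motif_seq_spec : Claim_equal_convert_motif_seq := by
  intro s _ hpre
  unfold Spec_convert_motif_seq convert_motif_seq convert_motif_seq_alt
  rw [PySem.List.foldl_append_singleton_eq_map, List.nil_append,
    pvRecPermute_eq_foldl _ (by simpa using hpre.1)]
  rw [List.foldl_map]
  rfl
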